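-- pv_equiv track=rewrite | github.com/rahul-tiwari-95/octane | octane/catalysts/registry.py | _data_satisfies
-- ===== SOURCE A (Python) =====
-- from typing import Any, Callable
--
-- def _data_satisfies(requires: list[str], upstream_results: dict[str, Any]) -> bool:
--     """Option B structural matching — check if any upstream result contains
--     at least one of the required keys.
--
--     Returns True if ANY dep's data dict contains ANY of the required keys.
--     This avoids coupling to agent names or node IDs.
--     """
--     if not requires:
--         return True
--     for dep_data in upstream_results.values():
--         if isinstance(dep_data, dict):
--             if any(key in dep_data for key in requires):
--                 return True
--     return False
-- ===== SOURCE B (Python) =====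
-- def _data_satisfies(requires: list[str], upstream_results: dict) -> bool:
--     """B: transposed, recursive formulation. First stage: collect the upstream
--     dicts once. Second stage: recurse over the required keys, key-major —
--     a key is satisfied if some collected dict contains it. Correct because
--     'exists dict, exists key' = 'exists key, exists dict' (or commutes)."""
--     if not requires:
--         return True
--     dicts = [d for d in upstream_results.values() if isinstance(d, dict)]
--
--     def found(keys):
--         if not keys:
--             return False
--         return any(keys[0] in d for d in dicts) or found(keys[1:])
--
--     return found(requires)
-- ===== Notes on version B (the rewrite author's own statement) =====
-- stated objective: alternative
-- what changed: Transposes A's loop nesting: instead of scanning upstream dicts and testing every required key inside each, B stages a dict-collection pass and then recurses key-major over the required keys, each step asking whether any collected dict contains that key.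
import Mathlib
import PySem

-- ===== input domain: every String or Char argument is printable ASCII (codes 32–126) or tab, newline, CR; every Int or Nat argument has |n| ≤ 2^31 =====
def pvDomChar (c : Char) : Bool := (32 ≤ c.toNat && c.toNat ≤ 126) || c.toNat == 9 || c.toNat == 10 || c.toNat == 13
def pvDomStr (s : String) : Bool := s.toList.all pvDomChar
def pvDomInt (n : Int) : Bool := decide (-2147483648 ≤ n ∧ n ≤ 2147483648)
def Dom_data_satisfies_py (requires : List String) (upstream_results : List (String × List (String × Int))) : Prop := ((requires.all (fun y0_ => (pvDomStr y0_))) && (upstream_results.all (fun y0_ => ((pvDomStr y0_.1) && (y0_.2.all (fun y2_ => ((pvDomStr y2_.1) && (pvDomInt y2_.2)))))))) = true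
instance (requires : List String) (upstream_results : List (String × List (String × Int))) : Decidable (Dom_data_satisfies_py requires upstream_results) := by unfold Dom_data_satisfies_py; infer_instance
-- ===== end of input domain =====

-- ===== PORT A =====
-- A: early-return True on empty requires; then scan upstream values (always dicts
-- under the type convention), returning True if any required key is a member.
def data_satisfies_py (requires : List String) (upstream_results : List (String × List (String × Int))) : Bool :=
  if requires.isEmpty then true
  else upstream_results.any (fun dep => requires.any (fun key => (dep.2.map Prod.fst).contains key))

-- ===== PORT B =====
-- B helper: recurse key-major over the required keys; a key is satisfied when
-- some collected dict contains it.
def pvFound_data_satisfies_py : List String → List (List (String × Int)) → Bool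
  | [], _ => false
  | k :: rest, dicts =>
      dicts.any (fun d => (d.map Prod.fst).contains k) || pvFound_data_satisfies_py rest dicts

-- B: collect the upstream dicts once, then recurse over the required keys.
def data_satisfies_py_alt (requires : List String) (upstream_results : List (String × List (String × Int))) : Bool :=
  if requires.isEmpty then true
  else
    let dicts := upstream_results.map (fun dep => dep.2)
    pvFound_data_satisfies_py requires dicts

-- ===== PRECONDITION & SPEC =====
def Spec_data_satisfies_py (requires : List String) (upstream_results : List (String × List (String × Int))) (out : Bool) : Prop := out = data_satisfies_py_alt requires upstream_results
instance (requires : List String) (upstream_results : List (String × List (String × Int))) (out : Bool) : Decidable (Spec_data_satisfies_py requires upstream_results out) := by unfold Spec_data_satisfies_py; infer_instance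

-- ===== CLAIM (what is proved, stated in full; the proofs are below) =====
def Claim_equal_data_satisfies_py : Prop := ∀ (requires : List String) (upstream_results : List (String × List (String × Int))), Dom_data_satisfies_py requires upstream_results → Spec_data_satisfies_py requires upstream_results (data_satisfies_py requires upstream_results)

-- ===== LEMMAS AND PROOFS =====

-- ===== VERDICT (by name: the statement is the Claim_ definition above) =====
lemma pvFound_iff (keys : List String) (dicts : List (List (String × Int))) :
    pvFound_data_satisfies_py keys dicts =
      dicts.any (fun d => keys.any (fun k => (d.map Prod.fst).contains k)) := by
  induction keys with
  | nil => simp [pvFound_data_satisfies_py]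
  | cons k rest ih =>
      simp only [pvFound_data_satisfies_py, ih]
      rw [Bool.eq_iff_iff]
      simp only [Bool.or_eq_true, List.any_eq_true, List.any_cons]
      constructor
      · rintro (⟨d, hd, h⟩ | ⟨d, hd, kk, hk, h⟩)
        · exact ⟨d, hd, Or.inl h⟩
        · exact ⟨d, hd, Or.inr ⟨kk, hk, h⟩⟩
      · rintro ⟨d, hd, h | ⟨kk, hk, h⟩⟩
        · exact Or.inl ⟨d, hd, h⟩
        · exact Or.inr ⟨d, hd, kk, hk, h⟩

theorem data_satisfies_py_spec : Claim_equal_data_satisfies_py := by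
  intro requires ups _
  unfold Spec_data_satisfies_py data_satisfies_py data_satisfies_py_alt
  by_cases h : requires.isEmpty = true
  · rw [if_pos h, if_pos h]
  · rw [if_neg h, if_neg h, pvFound_iff, List.any_map]
    rfl
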